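-- pv_equiv track=rewrite | github.com/Johnsonchan105/AdventOfCode | AOCDay3.py | getGE
-- ===== SOURCE A (Python) =====
-- def getGE(err):
--     ga = 0
--     ep = 0
--
--     counter = 1
--     for i in reversed(range(0, len(err[0]))):
--         one = 0
--         zero = 0
--         for j in range(0, len(err)):
--             if(err[j][i] == "1"):
--                 one += 1
--             else:
--                 zero += 1
--         OneOrZero = one > zero
--         if(OneOrZero):
--             ga += counter
--         else:
--             ep += counter
--
--         counter *= 2
--     return ga, ep
-- ===== SOURCE B (Python) =====
-- def getGE(err):
--     # Encode each row as a base-(n+1) numeral of its bits; summing the rows then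
--     # accumulates every column's one-count carry-free into a single integer, whose
--     # base-(n+1) digits are read back (LSB first) to decide each majority bit.
--     n = len(err)
--     w = len(err[0])
--     base = n + 1
--     total = 0
--     for row in err:
--         v = 0
--         for ch in row[:w]:
--             v = v * base + (1 if ch == "1" else 0)
--         total += v
--     gamma = 0
--     place = 1
--     for _ in range(w):
--         if (total % base) * 2 > n:
--             gamma += place
--         total //= base
--         place *= 2
--     return gamma, (1 << w) - 1 - gamma
-- ===== Notes on version B (the rewrite author's own statement) =====
-- stated objective: alternative
-- what changed: B replaces A's per-column counting loops by a carry-free positional-numeral trick: each row is encoded as a base-(n+1) integer of its bits, the rows are summed into ONE integer whose base-(n+1) digits are exactly the per-column one-counts, and gamma's bits are then read off the digits with divmod, epsilon being the arithmetic complement (1<<w)-1-gamma.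
import Mathlib
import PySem

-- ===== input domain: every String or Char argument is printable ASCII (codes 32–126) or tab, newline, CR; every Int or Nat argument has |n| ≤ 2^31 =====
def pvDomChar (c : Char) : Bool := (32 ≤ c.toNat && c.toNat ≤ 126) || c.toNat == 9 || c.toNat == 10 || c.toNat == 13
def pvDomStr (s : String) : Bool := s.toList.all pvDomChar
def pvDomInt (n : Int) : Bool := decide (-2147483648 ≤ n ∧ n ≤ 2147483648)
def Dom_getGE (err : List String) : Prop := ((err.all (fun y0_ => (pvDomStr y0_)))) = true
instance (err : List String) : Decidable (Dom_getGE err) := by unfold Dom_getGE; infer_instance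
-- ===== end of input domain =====

-- B packs each row into a base-(rows+1) numeral, sums the rows carry-free so the digits of one
-- integer are the per-column one-counts, and reads gamma off the digits; epsilon is the
-- arithmetic complement (alternative algorithm; same asymptotic cost).

-- ===== PORT A =====
-- Literal port of A.  Python raises IndexError where an index is out of range
-- (err[0] on [], err[j][i] on a row shorter than the first row); those inputs are
-- excluded by Pre_getGE below, and the port uses a default there ("" / ' ').
-- err[j][i] == "1" (a one-character string) is ported as the exact char comparison.
def getGE_inner (err : List String) (i : Int) : Int × Int :=
  (PySem.List.pyRange 0 (PySem.List.len err) 1).foldl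
    (fun (oz : Int × Int) (j : Int) =>
      if PySem.List.pyGetD (PySem.List.pyGetD err j "").toList i ' ' = '1'
      then (oz.1 + 1, oz.2) else (oz.1, oz.2 + 1)) (0, 0)

def getGE_step (err : List String) (st : Int × Int × Int) (i : Int) : Int × Int × Int :=
  let oz := getGE_inner err i
  if oz.1 > oz.2 then (st.1 + st.2.2, st.2.1, st.2.2 * 2)
  else (st.1, st.2.1 + st.2.2, st.2.2 * 2)

def getGE (err : List String) : Int × Int :=
  let w : Int := PySem.Str.len (PySem.List.pyGetD err 0 "")
  let res := (PySem.List.pyRange 0 w 1).reverse.foldl (getGE_step err) (0, 0, 1)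
  (res.1, res.2.1)

-- ===== PORT B =====
-- v = 0; for ch in row[:w]: v = v*base + (1 if ch == "1" else 0)
def encRow (base : Int) (w : Nat) (s : String) : Int :=
  (s.toList.take w).foldl (fun v c => v * base + (if c = '1' then 1 else 0)) 0

-- one iteration of Source B's digit-extraction loop on the state (total, gamma, place)
def extractStep (n base : Int) (st : Int × Int × Int) : Int × Int × Int :=
  (PySem.Int.floordiv st.1 base,
   (if PySem.Int.mod st.1 base * 2 > n then st.2.1 + st.2.2 else st.2.1),
   st.2.2 * 2)

def getGE_alt (err : List String) : Int × Int :=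
  let n : Int := PySem.List.len err
  let w : Nat := (PySem.List.pyGetD err 0 "").toList.length  -- len(err[0]); [] is outside Pre_
  let base : Int := n + 1
  let total : Int := err.foldl (fun t row => t + encRow base w row) 0
  let res := (List.range w).foldl (fun st _ => extractStep n base st) (total, 0, 1)
  (res.2.1, 2 ^ w - 1 - res.2.1)

-- ===== PRECONDITION & SPEC =====
-- Pre_ excludes exactly the inputs where Python A raises IndexError:
-- the empty list (err[0]) and lists with a row shorter than the first row (err[j][i]).
def Pre_getGE (err : List String) : Prop :=
  err ≠ [] ∧ ∀ s ∈ err, (err.headD "").length ≤ s.length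
instance (err : List String) : Decidable (Pre_getGE err) := by unfold Pre_getGE; infer_instance
def pvWitness_getGE : List String := ["10", "11", "01"]

def Spec_getGE (err : List String) (out : Int × Int) : Prop := out = getGE_alt err
instance (err : List String) (out : Int × Int) : Decidable (Spec_getGE err out) := by unfold Spec_getGE; infer_instance

-- ===== CLAIM (what is proved, stated in full; the proofs are below) =====
def Claim_equal_getGE : Prop := ∀ (err : List String), Dom_getGE err → Pre_getGE err → Spec_getGE err (getGE err)

-- ===== LEMMAS AND PROOFS =====

-- the majority bit of column i (getD semantics; under Pre_ every index is in range)
def bitOf (err : List String) (i : Nat) : Int :=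
  if 2 * (err.countP (fun s => s.toList.getD i ' ' = '1') : Int) > (err.length : Int) then 1 else 0

-- Int-valued one-count of column i
def cntI (err : List String) (i : Nat) : Int :=
  (err.countP (fun s => s.toList.getD i ' ' = '1') : Int)

-- Σ_{i<w} bitOf i · 2^(w-1-i), recursively (shared normal form of both ports' gammas)
def gam (err : List String) : Nat → Int
  | 0 => 0
  | w + 1 => bitOf err w + 2 * gam err w

def eps (err : List String) : Nat → Int
  | 0 => 0
  | w + 1 => (1 - bitOf err w) + 2 * eps err w

theorem gam_add_eps (err : List String) (w : Nat) : gam err w + eps err w = 2 ^ w - 1 := by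
  induction w with
  | zero => simp [gam, eps]
  | succ w ih =>
    simp only [gam, eps, pow_succ]
    omega

theorem gam_succ (err : List String) (W : Nat) :
    gam err (W + 1) = bitOf err W + 2 * gam err W := rfl

theorem eps_succ (err : List String) (W : Nat) :
    eps err (W + 1) = (1 - bitOf err W) + 2 * eps err W := rfl

-- A's inner loop counts '1's (and the complement) over err
theorem inner_count (err : List String) (i : Int) (a b : Int) :
    err.foldl (fun (oz : Int × Int) s =>
        if PySem.List.pyGetD s.toList i ' ' = '1'
        then (oz.1 + 1, oz.2) else (oz.1, oz.2 + 1)) (a, b)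
      = (a + (err.countP (fun s => PySem.List.pyGetD s.toList i ' ' = '1') : Int),
         b + ((err.length : Int) - (err.countP (fun s => PySem.List.pyGetD s.toList i ' ' = '1') : Int))) := by
  induction err generalizing a b with
  | nil => simp
  | cons s t ih =>
    simp only [List.foldl_cons, List.countP_cons, List.length_cons]
    by_cases h : PySem.List.pyGetD s.toList i ' ' = '1'
    · rw [if_pos h, ih]
      simp only [h, decide_true, if_true, Prod.mk.injEq]
      push_cast
      omega
    · rw [if_neg h, ih]
      simp only [h, decide_false, Prod.mk.injEq]
      push_cast
      omega

-- A's step at a Nat column index is the bitOf-selected update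
theorem step_eq (err : List String) (st : Int × Int × Int) (k : Nat) :
    getGE_step err st (k : Int)
      = if bitOf err k = 1 then (st.1 + st.2.2, st.2.1, st.2.2 * 2)
        else (st.1, st.2.1 + st.2.2, st.2.2 * 2) := by
  have hinner : getGE_inner err (k : Int)
      = ((err.countP (fun s => s.toList.getD k ' ' = '1') : Int),
         (err.length : Int) - (err.countP (fun s => s.toList.getD k ' ' = '1') : Int)) := by
    unfold getGE_inner
    rw [PySem.List.foldl_pyRange_zero_pyGetD err ""
        (fun (oz : Int × Int) (s : String) =>
          if PySem.List.pyGetD s.toList (k : Int) ' ' = '1'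
          then (oz.1 + 1, oz.2) else (oz.1, oz.2 + 1)) (0, 0)]
    rw [inner_count]
    simp [PySem.List.pyGetD_natCast]
  have hcnt : (0 : Int) ≤ (err.countP (fun s => s.toList.getD k ' ' = '1') : Int) := by positivity
  unfold getGE_step bitOf
  rw [hinner]
  by_cases h : 2 * (err.countP (fun s => s.toList.getD k ' ' = '1') : Int) > (err.length : Int)
  · rw [if_pos h, if_pos (by omega), if_pos rfl]
  · rw [if_neg h, if_neg (by omega), if_neg (by omega)]

-- A's outer loop in closed form
theorem outerA (err : List String) (W : Nat) :
    ∀ (ga ep c : Int),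
      ((List.range W).reverse).foldl (fun st (k : Nat) => getGE_step err st (k : Int)) (ga, ep, c)
        = (ga + c * gam err W, ep + c * eps err W, c * 2 ^ W) := by
  induction W with
  | zero => intro ga ep c; simp [gam, eps]
  | succ W ih =>
    intro ga ep c
    rw [List.range_succ, List.reverse_append]
    simp only [List.reverse_cons, List.reverse_nil, List.nil_append,
      List.singleton_append, List.foldl_cons]
    rw [step_eq]
    by_cases h : bitOf err W = 1
    · rw [if_pos h, ih]
      simp only [gam_succ, eps_succ, h, pow_succ, Prod.mk.injEq]
      refine ⟨by ring, by ring, by ring⟩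
    · have h0 : bitOf err W = 0 := by unfold bitOf; unfold bitOf at h; split_ifs at h ⊢ <;> simp_all
      rw [if_neg h, ih]
      simp only [gam_succ, eps_succ, h0, pow_succ, Prod.mk.injEq]
      refine ⟨by ring, by ring, by ring⟩

theorem getGE_eq (err : List String) :
    getGE err = (gam err (PySem.List.pyGetD err 0 "").toList.length,
                 eps err (PySem.List.pyGetD err 0 "").toList.length) := by
  simp only [getGE]
  rw [PySem.Str.len_eq, PySem.List.pyRange_zero_nat, ← List.map_reverse, List.foldl_map]
  rw [outerA]
  simp

-- ---------- B-side ----------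

-- both sums Σ f(w-1-k)·B^k and Σ f(i)·B^(w-1-i) are the same numeral, read from both ends
theorem sum_reflect_pow (f : Nat → Int) (B : Int) (w : Nat) :
    (∑ k ∈ Finset.range w, f (w - 1 - k) * B ^ k)
      = ∑ i ∈ Finset.range w, f i * B ^ (w - 1 - i) := by
  rw [← Finset.sum_range_reflect (fun j => f j * B ^ (w - 1 - j)) w]
  refine Finset.sum_congr rfl ?_
  intro j hj
  rw [Finset.mem_range] at hj
  congr 2
  omega

-- encRow in closed form: the row's bits as base-B digits, MSB first
theorem encRow_eq (B : Int) (w : Nat) (s : String) (h : w ≤ s.toList.length) :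
    encRow B w s
      = ∑ i ∈ Finset.range w,
          (if s.toList.getD i ' ' = '1' then (1 : Int) else 0) * B ^ (w - 1 - i) := by
  induction w with
  | zero => simp [encRow]
  | succ w ih =>
    have hw : w < s.toList.length := by omega
    have htake : s.toList.take (w + 1) = s.toList.take w ++ [s.toList.getD w ' '] := by
      rw [List.take_add_one]
      congr 1
      rw [List.getElem?_eq_getElem hw]
      simp [List.getD, List.getElem?_eq_getElem hw]
    have : encRow B (w + 1) s
        = encRow B w s * B + (if s.toList.getD w ' ' = '1' then (1 : Int) else 0) := by
      simp [encRow, htake, List.foldl_append]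
    rw [this, ih (by omega), Finset.sum_range_succ, Finset.sum_mul]
    have hx : ∀ i ∈ Finset.range w,
        (if s.toList.getD i ' ' = '1' then (1 : Int) else 0) * B ^ (w - 1 - i) * B
          = (if s.toList.getD i ' ' = '1' then (1 : Int) else 0) * B ^ (w + 1 - 1 - i) := by
      intro i hi
      rw [Finset.mem_range] at hi
      rw [mul_assoc, ← pow_succ]
      congr 2
      omega
    rw [Finset.sum_congr rfl hx]
    have h0 : w + 1 - 1 - w = 0 := by omega
    rw [h0, pow_zero, mul_one]

-- the summing loop: one integer whose base-B digits are the per-column one-counts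
theorem total_eq (B : Int) (w : Nat) (err : List String)
    (h : ∀ s ∈ err, w ≤ s.toList.length) :
    ∀ acc : Int,
      err.foldl (fun t row => t + encRow B w row) acc
        = acc + ∑ i ∈ Finset.range w, cntI err i * B ^ (w - 1 - i) := by
  induction err with
  | nil => intro acc; simp [cntI]
  | cons r t ih =>
    intro acc
    simp only [List.foldl_cons]
    rw [ih (fun s hs => h s (by simp [hs]))]
    rw [encRow_eq B w r (h r (by simp))]
    have hc : ∀ i, cntI (r :: t) i
        = (if r.toList.getD i ' ' = '1' then (1 : Int) else 0) + cntI t i := by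
      intro i
      simp only [cntI, List.countP_cons]
      by_cases hr : r.toList.getD i ' ' = '1'
      · simp [hr]
        ring
      · simp [hr]
        push_cast
        ring
    have : ∑ i ∈ Finset.range w, cntI (r :: t) i * B ^ (w - 1 - i)
        = ∑ i ∈ Finset.range w,
            ((if r.toList.getD i ' ' = '1' then (1 : Int) else 0) * B ^ (w - 1 - i)
              + cntI t i * B ^ (w - 1 - i)) := by
      refine Finset.sum_congr rfl ?_
      intro i _
      rw [hc i]
      ring
    rw [this, Finset.sum_add_distrib]
    ring

-- the extraction loop reads the digits back, LSB first
theorem extract_eq (n : Int) (hn : 0 ≤ n) :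
    ∀ (m : Nat) (D : Nat → Int) (g p : Int),
      (∀ k, 0 ≤ D k ∧ D k ≤ n) →
      (List.range m).foldl (fun st _ => extractStep n (n + 1) st)
          (∑ k ∈ Finset.range m, D k * (n + 1) ^ k, g, p)
        = (0, g + p * ∑ k ∈ Finset.range m, (if 2 * D k > n then (1 : Int) else 0) * 2 ^ k,
           p * 2 ^ m) := by
  intro m
  induction m with
  | zero => intro D g p _; simp
  | succ m ih =>
    intro D g p hD
    have hB : (0 : Int) < n + 1 := by omega
    have hsplit : (∑ k ∈ Finset.range (m + 1), D k * (n + 1) ^ k)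
        = D 0 + (n + 1) * ∑ k ∈ Finset.range m, D (k + 1) * (n + 1) ^ k := by
      rw [Finset.sum_range_succ', Finset.mul_sum]
      have : ∀ k ∈ Finset.range m,
          D (k + 1) * (n + 1) ^ (k + 1) = (n + 1) * (D (k + 1) * (n + 1) ^ k) := by
        intro k _; rw [pow_succ]; ring
      rw [Finset.sum_congr rfl this]
      ring
    have hstep : extractStep n (n + 1)
        (∑ k ∈ Finset.range (m + 1), D k * (n + 1) ^ k, g, p)
        = (∑ k ∈ Finset.range m, D (k + 1) * (n + 1) ^ k,
           (if 2 * D 0 > n then g + p else g), p * 2) := by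
      obtain ⟨h0, h1⟩ := hD 0
      simp only [extractStep, hsplit]
      rw [PySem.Int.mod_eq_emod_of_pos hB, PySem.Int.floordiv_eq_ediv_of_pos hB]
      have hmod : (D 0 + (n + 1) * ∑ k ∈ Finset.range m, D (k + 1) * (n + 1) ^ k) % (n + 1)
          = D 0 := by
        rw [Int.add_mul_emod_self_left]
        exact Int.emod_eq_of_lt h0 (by omega)
      have hdiv : (D 0 + (n + 1) * ∑ k ∈ Finset.range m, D (k + 1) * (n + 1) ^ k) / (n + 1)
          = ∑ k ∈ Finset.range m, D (k + 1) * (n + 1) ^ k := by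
        rw [Int.add_mul_ediv_left _ _ (by omega : (n + 1) ≠ 0),
            Int.ediv_eq_zero_of_lt h0 (by omega)]
        ring
      rw [hmod, hdiv]
      by_cases hb : 2 * D 0 > n
      · rw [if_pos (by omega), if_pos hb]
      · rw [if_neg (by omega), if_neg hb]
    rw [List.range_succ_eq_map, List.foldl_cons, List.foldl_map, hstep,
        ih (fun k => D (k + 1)) _ _ (fun k => hD (k + 1))]
    have hsum : (∑ k ∈ Finset.range (m + 1), (if 2 * D k > n then (1 : Int) else 0) * 2 ^ k)
        = (if 2 * D 0 > n then (1 : Int) else 0)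
          + 2 * ∑ k ∈ Finset.range m, (if 2 * D (k + 1) > n then (1 : Int) else 0) * 2 ^ k := by
      rw [Finset.sum_range_succ', Finset.mul_sum]
      have : ∀ k ∈ Finset.range m,
          (if 2 * D (k + 1) > n then (1 : Int) else 0) * 2 ^ (k + 1)
            = 2 * ((if 2 * D (k + 1) > n then (1 : Int) else 0) * 2 ^ k) := by
        intro k _; rw [pow_succ]; ring
      rw [Finset.sum_congr rfl this]
      ring
    simp only [Prod.mk.injEq]
    refine ⟨trivial, ?_, by ring⟩
    rw [hsum]
    by_cases hb : 2 * D 0 > n <;> simp [hb] <;> ring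

-- gam in Σ form
theorem gam_sum (err : List String) (w : Nat) :
    gam err w = ∑ i ∈ Finset.range w, bitOf err i * 2 ^ (w - 1 - i) := by
  induction w with
  | zero => simp [gam]
  | succ w ih =>
    have hcong : (∑ i ∈ Finset.range w, bitOf err i * 2 ^ (w + 1 - 1 - i))
        = ∑ i ∈ Finset.range w, 2 * (bitOf err i * 2 ^ (w - 1 - i)) := by
      refine Finset.sum_congr rfl ?_
      intro i hi
      rw [Finset.mem_range] at hi
      have : w + 1 - 1 - i = (w - 1 - i) + 1 := by omega
      rw [this, pow_succ]
      ring
    rw [gam_succ, ih, Finset.sum_range_succ, hcong, ← Finset.mul_sum]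
    have h0 : w + 1 - 1 - w = 0 := by omega
    rw [h0, pow_zero, mul_one]
    ring

theorem getGE_alt_eq (err : List String) (hpre : Pre_getGE err) :
    getGE_alt err = (gam err (PySem.List.pyGetD err 0 "").toList.length,
                     2 ^ (PySem.List.pyGetD err 0 "").toList.length - 1
                       - gam err (PySem.List.pyGetD err 0 "").toList.length) := by
  obtain ⟨hne, hlen⟩ := hpre
  simp only [getGE_alt]
  have hlen' : ∀ s ∈ err, (PySem.List.pyGetD err 0 "").toList.length ≤ s.toList.length := by
    intro s hs
    have h0 : (PySem.List.pyGetD err 0 "") = err.headD "" := by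
      cases err with
      | nil => exact absurd rfl hne
      | cons a t => simp [PySem.List.pyGetD_zero]
    rw [h0]
    simpa [String.length_toList] using hlen s hs
  set w : Nat := (PySem.List.pyGetD err 0 "").toList.length with hw
  have hnlen : PySem.List.len err = (err.length : Int) := by
    simp [PySem.List.len]
  rw [hnlen, total_eq ((err.length : Int) + 1) w err hlen' 0]
  have htot : (0 : Int) + ∑ i ∈ Finset.range w, cntI err i * ((err.length : Int) + 1) ^ (w - 1 - i)
      = ∑ k ∈ Finset.range w, cntI err (w - 1 - k) * ((err.length : Int) + 1) ^ k := by
    rw [sum_reflect_pow (cntI err) ((err.length : Int) + 1) w]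
    ring
  rw [htot, extract_eq (err.length : Int) (by positivity) w
        (fun k => cntI err (w - 1 - k)) 0 1
        (fun k => ⟨by simp [cntI], by
          simp only [cntI]
          exact_mod_cast List.countP_le_length⟩)]
  have hbit : ∀ k, (if 2 * cntI err (w - 1 - k) > (err.length : Int) then (1 : Int) else 0)
      = bitOf err (w - 1 - k) := by
    intro k
    simp [bitOf, cntI]
  have hg : (0 : Int) + 1 * ∑ k ∈ Finset.range w,
        (if 2 * cntI err (w - 1 - k) > (err.length : Int) then (1 : Int) else 0) * 2 ^ k
      = gam err w := by
    rw [gam_sum]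
    have : ∀ k ∈ Finset.range w,
        (if 2 * cntI err (w - 1 - k) > (err.length : Int) then (1 : Int) else 0) * 2 ^ k
          = bitOf err (w - 1 - k) * 2 ^ k := by
      intro k _; rw [hbit k]
    rw [Finset.sum_congr rfl this, sum_reflect_pow (bitOf err) 2 w]
    ring
  rw [hg]

-- ===== VERDICT (by name: the statement is the Claim_ definition above) =====
theorem getGE_spec : Claim_equal_getGE := by
  intro err _ hpre
  unfold Spec_getGE
  rw [getGE_eq, getGE_alt_eq err hpre]
  have := gam_add_eps err (PySem.List.pyGetD err 0 "").toList.length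
  simp only [Prod.mk.injEq]
  exact ⟨trivial, by omega⟩
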